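-- pv_equiv track=rewrite | github.com/ericdiaz78/ai-model-repo | scripts/fetch_direct_usage.py | match_model
-- ===== SOURCE A (Python) =====
-- def match_model(slug, models):
--     for m in models:
--         if m["model_id"] == slug or m.get("openrouter_slug") == slug:
--             return m
--     # Fuzzy: provider/name contains slug fragments
--     slug_parts = slug.lower().replace("-", " ").split()
--     for m in models:
--         mid = m["model_id"].lower().replace("-", " ")
--         if sum(1 for p in slug_parts if p in mid) >= 2:
--             return m
--     return None
-- ===== SOURCE B (Python) =====
-- def match_model(slug, models):
--     # Single pass: return first exact match immediately; remember the first
--     # fuzzy candidate and return it only if no exact match exists.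
--     slug_parts = slug.lower().replace("-", " ").split()
--     fuzzy = None
--     for m in models:
--         mid = m["model_id"]
--         if mid == slug or m.get("openrouter_slug") == slug:
--             return m
--         if fuzzy is None and sum(1 for p in slug_parts if p in mid.lower().replace("-", " ")) >= 2:
--             fuzzy = m
--     return fuzzy
-- ===== Notes on version B (the rewrite author's own statement) =====
-- stated objective: alternative
-- what changed: A's two sequential scans (exact-match scan, then fuzzy scan) are fused into one pass that returns the first exact match immediately and accumulates the first fuzzy candidate in a variable, returned only if no exact match exists.
import Mathlib
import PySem

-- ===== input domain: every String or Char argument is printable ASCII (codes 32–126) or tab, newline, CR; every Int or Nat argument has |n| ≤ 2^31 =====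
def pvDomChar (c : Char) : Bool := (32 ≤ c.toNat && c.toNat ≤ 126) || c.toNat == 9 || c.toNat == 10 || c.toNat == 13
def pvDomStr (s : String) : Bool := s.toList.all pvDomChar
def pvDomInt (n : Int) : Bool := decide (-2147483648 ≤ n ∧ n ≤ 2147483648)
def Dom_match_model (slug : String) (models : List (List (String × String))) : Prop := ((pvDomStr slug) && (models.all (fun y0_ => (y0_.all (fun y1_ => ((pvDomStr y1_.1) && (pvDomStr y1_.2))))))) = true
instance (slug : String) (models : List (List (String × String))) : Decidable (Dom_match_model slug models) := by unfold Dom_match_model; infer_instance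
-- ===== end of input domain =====

-- B fuses A's two sequential scans (exact-match scan, then fuzzy scan) into one pass
-- that returns the first exact match immediately and accumulates the first fuzzy candidate.


-- ===== PORT A =====
-- first loop of A: return the first m with m["model_id"] == slug or m.get("openrouter_slug") == slug
-- (a missing "model_id" key is a KeyError in Python: excluded by Pre_, ported as `none`)
def pvExactScan (slug : String) : List (List (String × String)) → Option (List (String × String))
  | [] => none
  | m :: rest =>
    match (PySem.Dict.mk m).get? "model_id" with
    | none => none
    | some mid =>
      if mid == slug || (PySem.Dict.mk m).get? "openrouter_slug" == some slug then some m
      else pvExactScan slug rest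

-- second loop of A: first m whose lowered/space-normalised model_id contains ≥ 2 slug parts
def pvFuzzyScan (parts : List String) : List (List (String × String)) → Option (List (String × String))
  | [] => none
  | m :: rest =>
    match (PySem.Dict.mk m).get? "model_id" with
    | none => none
    | some mid0 =>
      let mid := PySem.Str.replace (PySem.Str.lower mid0) "-" " "
      if 2 ≤ (parts.countP fun p => PySem.Str.isIn p mid) then some m
      else pvFuzzyScan parts rest

def match_model (slug : String) (models : List (List (String × String))) : Option (List (String × String)) :=
  match pvExactScan slug models with
  | some m => some m
  | none =>
    let slug_parts := PySem.Str.split₀ (PySem.Str.replace (PySem.Str.lower slug) "-" " ")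
    pvFuzzyScan slug_parts models

-- ===== PORT B =====
-- single pass: return the first exact match at once, carry the first fuzzy candidate
def pvAltGo (slug : String) (parts : List String) (fuzzy : Option (List (String × String))) :
    List (List (String × String)) → Option (List (String × String))
  | [] => fuzzy
  | m :: rest =>
    match (PySem.Dict.mk m).get? "model_id" with
    | none => none
    | some mid =>
      if mid == slug || (PySem.Dict.mk m).get? "openrouter_slug" == some slug then some m
      else
        pvAltGo slug parts
          (if fuzzy.isNone && decide (2 ≤ (parts.countP fun p =>
              PySem.Str.isIn p (PySem.Str.replace (PySem.Str.lower mid) "-" " ")))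
           then some m else fuzzy) rest

def match_model_alt (slug : String) (models : List (List (String × String))) : Option (List (String × String)) :=
  let slug_parts := PySem.Str.split₀ (PySem.Str.replace (PySem.Str.lower slug) "-" " ")
  pvAltGo slug slug_parts none models

-- ===== PRECONDITION & SPEC =====
-- is m an exact match for slug? (false when "model_id" is missing — A raises before testing)
def pvIsExact (slug : String) (m : List (String × String)) : Bool :=
  match (PySem.Dict.mk m).get? "model_id" with
  | none => false
  | some mid => mid == slug || (PySem.Dict.mk m).get? "openrouter_slug" == some slug

-- A raises KeyError on m["model_id"] at the first model lacking that key unless an exact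
-- match occurs strictly before it; Pre_ excludes exactly those raising inputs.
def Pre_match_model (slug : String) (models : List (List (String × String))) : Prop :=
  ∀ i, i < models.length →
    (PySem.Dict.mk (models.getD i [])).get? "model_id" = none →
    ∃ j, j < i ∧ pvIsExact slug (models.getD j []) = true
instance (slug : String) (models : List (List (String × String))) : Decidable (Pre_match_model slug models) := by unfold Pre_match_model; infer_instance

def pvWitness_match_model : String × (List (List (String × String))) :=
  ("gpt-4", [[("model_id", "llama two")], [("model_id", "gpt 4 turbo")]])

def Spec_match_model (slug : String) (models : List (List (String × String))) (out : Option (List (String × String))) : Prop := out = match_model_alt slug models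
instance (slug : String) (models : List (List (String × String))) (out : Option (List (String × String))) : Decidable (Spec_match_model slug models out) := by unfold Spec_match_model; infer_instance

-- ===== CLAIM (what is proved, stated in full; the proofs are below) =====
def Claim_equal_match_model : Prop := ∀ (slug : String) (models : List (List (String × String))), Dom_match_model slug models → Pre_match_model slug models → Spec_match_model slug models (match_model slug models)

-- ===== LEMMAS AND PROOFS =====

-- Pre_ on a cons: the head has a "model_id" key, and either the head is exact or Pre_ holds on the tail
theorem pre_cons_key {slug : String} {m : List (String × String)} {rest : List (List (String × String))}
    (h : Pre_match_model slug (m :: rest)) :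
    ∃ mid, (PySem.Dict.mk m).get? "model_id" = some mid := by
  rcases hk : (PySem.Dict.mk m).get? "model_id" with _ | mid
  · rcases h 0 (by simp) (by simpa using hk) with ⟨j, hj, _⟩; omega
  · exact ⟨mid, rfl⟩

theorem pre_cons_tail {slug : String} {m : List (String × String)} {rest : List (List (String × String))}
    (h : Pre_match_model slug (m :: rest)) (hne : pvIsExact slug m = false) :
    Pre_match_model slug rest := by
  intro i hi hkey
  rcases h (i + 1) (by simpa using Nat.succ_lt_succ hi) (by simpa using hkey) with ⟨j, hj, hex⟩
  cases j with
  | zero => simp at hex; rw [hne] at hex; exact absurd hex (by simp)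
  | succ j' => exact ⟨j', by omega, by simpa using hex⟩

-- the fused scan equals: first exact match, else the carried candidate, else the first fuzzy match
theorem altGo_eq (slug : String) (parts : List String) :
    ∀ (models : List (List (String × String))) (fuzzy : Option (List (String × String))),
    (∀ i, i < models.length →
        (PySem.Dict.mk (models.getD i [])).get? "model_id" = none →
        ∃ j, j < i ∧ pvIsExact slug (models.getD j []) = true) →
    pvAltGo slug parts fuzzy models =
      match pvExactScan slug models with
      | some m => some m
      | none =>
        match fuzzy with
        | some f => some f
        | none => pvFuzzyScan parts models := by
  intro models
  induction models with
  | nil =>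
    intro fuzzy _
    cases fuzzy <;> simp [pvAltGo, pvExactScan, pvFuzzyScan]
  | cons m rest ih =>
    intro fuzzy hpre
    obtain ⟨mid, hmid⟩ := pre_cons_key (slug := slug) hpre
    by_cases hex : (mid == slug || (PySem.Dict.mk m).get? "openrouter_slug" == some slug) = true
    · simp [pvAltGo, pvExactScan, hmid, hex]
    · have hnexB : pvIsExact slug m = false := by
        simp only [pvIsExact, hmid]; exact Bool.not_eq_true _ ▸ (by simpa using hex)
      have hrest := pre_cons_tail (slug := slug) hpre hnexB
      have hexF : (mid == slug || (PySem.Dict.mk m).get? "openrouter_slug" == some slug) = false :=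
        Bool.not_eq_true _ ▸ (by simpa using hex)
      rw [show pvAltGo slug parts fuzzy (m :: rest) =
            pvAltGo slug parts
              (if fuzzy.isNone && decide (2 ≤ (parts.countP fun p =>
                  PySem.Str.isIn p (PySem.Str.replace (PySem.Str.lower mid) "-" " ")))
               then some m else fuzzy) rest from by
            simp [pvAltGo, hmid, hexF]]
      rw [ih _ hrest]
      rw [show pvExactScan slug (m :: rest) = pvExactScan slug rest from by
            simp [pvExactScan, hmid, hexF]]
      rw [show pvFuzzyScan parts (m :: rest) =
            (if 2 ≤ (parts.countP fun p =>
                PySem.Str.isIn p (PySem.Str.replace (PySem.Str.lower mid) "-" " "))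
             then some m else pvFuzzyScan parts rest) from by
            simp [pvFuzzyScan, hmid]]
      cases pvExactScan slug rest with
      | some m' => simp
      | none =>
        cases fuzzy with
        | some f => simp
        | none =>
            by_cases hc : 2 ≤ List.countP
                (fun p => PySem.Chars.isIn p.toList
                  (PySem.Chars.replace (PySem.Chars.lower mid.toList) ['-'] [' '])) parts <;>
              simp [hc]

-- ===== VERDICT (by name: the statement is the Claim_ definition above) =====
theorem match_model_spec : Claim_equal_match_model := by
  intro slug models _ hpre
  unfold Spec_match_model match_model match_model_alt
  rw [altGo_eq slug _ models none hpre]
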